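-- pv_equiv track=rewrite | github.com/Joint-Photon-Sciences-Institute/MD-EXAFS | src/md_exafs/trajectory_processor.py | _distribute_frames
-- ===== SOURCE A (Python) =====
-- from typing import Dict, Any, List, Tuple
--
-- def _distribute_frames(
--     frame_list: List[int],
--     cores_per_node: int,
--     frames_per_dir: int
-- ) -> Dict[int, List[int]]:
--     """Distribute frames across working directories."""
--     frame_distribution = {}
--     frames_processed = 0
--     remaining_frames = len(frame_list) % cores_per_node
--
--     for dir_num in range(min(cores_per_node, len(frame_list))):
--         start_idx = frames_processed
--         # Add one extra frame to directories until remaining_frames are used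
--         if dir_num < remaining_frames:
--             end_idx = start_idx + frames_per_dir + 1
--         else:
--             end_idx = start_idx + frames_per_dir
--
--         frame_distribution[dir_num] = frame_list[start_idx:end_idx]
--         frames_processed = end_idx
--
--     return frame_distribution
-- ===== SOURCE B (Python) =====
-- def _distribute_frames(frame_list, cores_per_node, frames_per_dir):
--     """Distribute frames across working directories by scattering each frame
--     directly into its directory, computed by inverting the layout: the first
--     `remaining` directories hold frames_per_dir+1 frames, the rest frames_per_dir."""
--     num_dirs = min(cores_per_node, len(frame_list))
--     remaining = len(frame_list) % cores_per_node
--     buckets = {i: [] for i in range(num_dirs)}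
--     enlarged = (frames_per_dir + 1) * remaining  # frames held by the enlarged directories
--     for j, frame in enumerate(frame_list):
--         if j < enlarged:
--             i = j // (frames_per_dir + 1)
--         elif frames_per_dir > 0:
--             i = remaining + (j - enlarged) // frames_per_dir
--         else:
--             continue  # zero-capacity directories take no frames
--         if i < num_dirs:
--             buckets[i].append(frame)
--     return buckets
-- ===== Notes on version B (the rewrite author's own statement) =====
-- stated objective: alternative
-- what changed: Replaced A's gather (per-directory slicing behind a running frames_processed cursor) by a scatter: one pass over enumerate(frame_list) computes each frame's directory by inverting the layout (floor-dividing the frame index by the chunk widths) and appends it into pre-built empty buckets.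
-- intended difference: On negative frames_per_dir (with 0 < cores_per_node and enough frames that a slice bound stays reachable) A's negative slice indices wrap around the list and hand some directory a nonempty tail; B leaves every directory empty, the intended reading of a non-positive per-directory frame count. — e.g. on _distribute_frames([1, 2], 1, -1): A returns [(0, [1])], B returns [(0, [])]
import Mathlib
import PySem

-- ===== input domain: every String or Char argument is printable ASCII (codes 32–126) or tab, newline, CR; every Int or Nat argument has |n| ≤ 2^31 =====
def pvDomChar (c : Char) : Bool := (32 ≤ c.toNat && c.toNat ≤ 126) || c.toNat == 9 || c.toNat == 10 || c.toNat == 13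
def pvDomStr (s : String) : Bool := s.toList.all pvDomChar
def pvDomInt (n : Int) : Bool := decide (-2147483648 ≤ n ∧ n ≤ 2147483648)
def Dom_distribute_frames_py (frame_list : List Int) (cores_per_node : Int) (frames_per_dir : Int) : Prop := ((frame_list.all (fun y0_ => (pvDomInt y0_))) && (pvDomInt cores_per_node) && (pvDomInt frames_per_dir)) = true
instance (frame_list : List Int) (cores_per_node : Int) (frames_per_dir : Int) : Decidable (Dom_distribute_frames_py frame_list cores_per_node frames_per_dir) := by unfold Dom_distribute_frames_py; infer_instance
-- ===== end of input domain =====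

-- B scatters each frame directly into its directory, computed by inverting the layout,
-- instead of A's per-directory slicing behind a running cursor (objective: alternative);
-- on negative frames_per_dir B leaves every directory empty where A's negative slice
-- indices can wrap around the list (see D_ below).

-- ===== PORT A =====
-- Literal transliteration: a dict and a frames_processed accumulator threaded through the loop.
def distribute_frames_py (frame_list : List Int) (cores_per_node : Int) (frames_per_dir : Int) : List (Int × List Int) :=
  let remaining_frames := PySem.Int.mod (frame_list.length : Int) cores_per_node
  let st := (PySem.List.pyRange 0 (min cores_per_node (frame_list.length : Int))).foldl
    (fun (st : PySem.Dict Int (List Int) × Int) dir_num =>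
      let start_idx := st.2
      let end_idx := if dir_num < remaining_frames then start_idx + frames_per_dir + 1
                     else start_idx + frames_per_dir
      (st.1.insert dir_num (PySem.List.slice frame_list (some start_idx) (some end_idx)), end_idx))
    (PySem.Dict.empty, 0)
  st.1.items

-- ===== PORT B =====
-- Transliteration of Source B: `{i: [] for i in range(num_dirs)}` is the dict whose items are
-- exactly these distinct keys in order; the loop over enumerate(frame_list) follows the
-- if/elif/else branches (`continue` = leave the dict unchanged; the trailing
-- `if i < num_dirs: buckets[i].append(frame)` is repeated in each branch that assigns i,
-- and `buckets[i].append(x)` on a present key is modify i [] (· ++ [x])).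
def distribute_frames_py_alt (frame_list : List Int) (cores_per_node : Int) (frames_per_dir : Int) : List (Int × List Int) :=
  let num_dirs := min cores_per_node (frame_list.length : Int)
  let remaining := PySem.Int.mod (frame_list.length : Int) cores_per_node
  let enlarged := (frames_per_dir + 1) * remaining
  let buckets0 : PySem.Dict Int (List Int) :=
    PySem.Dict.mk ((PySem.List.pyRange 0 num_dirs).map (fun i => (i, ([] : List Int))))
  let buckets := (PySem.List.enumerate frame_list 0).foldl
    (fun (b : PySem.Dict Int (List Int)) p =>
      if p.1 < enlarged then
        let i := PySem.Int.floordiv p.1 (frames_per_dir + 1)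
        if i < num_dirs then b.modify i [] (· ++ [p.2]) else b
      else if frames_per_dir > 0 then
        let i := remaining + PySem.Int.floordiv (p.1 - enlarged) frames_per_dir
        if i < num_dirs then b.modify i [] (· ++ [p.2]) else b
      else b)
    buckets0
  buckets.items

-- ===== PRECONDITION & SPEC =====
-- Pre_ excludes exactly cores_per_node = 0, where Python's `len(frame_list) % cores_per_node`
-- raises ZeroDivisionError in A (and in B alike).
def Pre_distribute_frames_py (frame_list : List Int) (cores_per_node : Int) (frames_per_dir : Int) : Prop :=
  cores_per_node ≠ 0
instance (frame_list : List Int) (cores_per_node : Int) (frames_per_dir : Int) : Decidable (Pre_distribute_frames_py frame_list cores_per_node frames_per_dir) := by unfold Pre_distribute_frames_py; infer_instance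
def pvWitness_distribute_frames_py : List Int × Int × Int := ([1, 2, 3, 4, 5], 2, 2)

-- On negative frames_per_dir (with 0 < cores_per_node and enough frames that a slice stays
-- reachable) A returns buckets cut at negative slice indices, so Python's negative-index
-- wraparound hands some directory a nonempty tail of the list; B returns every directory
-- empty, the intended reading of a non-positive per-directory frame count.
def D_distribute_frames_py (frame_list : List Int) (cores_per_node : Int) (frames_per_dir : Int) : Prop :=
  0 < cores_per_node ∧ frames_per_dir < 0 ∧
    (if frames_per_dir = -1 then
      2 ≤ frame_list.length ∧ cores_per_node.toNat ≤ frame_list.length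
    else
      frames_per_dir.natAbs < frame_list.length +
        (if (frame_list.length : Int) % cores_per_node = 0 then 0 else 1))
instance (frame_list : List Int) (cores_per_node : Int) (frames_per_dir : Int) : Decidable (D_distribute_frames_py frame_list cores_per_node frames_per_dir) := by unfold D_distribute_frames_py; infer_instance
def Spec_distribute_frames_py (frame_list : List Int) (cores_per_node : Int) (frames_per_dir : Int) (out : List (Int × List Int)) : Prop := ¬ D_distribute_frames_py frame_list cores_per_node frames_per_dir → out = distribute_frames_py_alt frame_list cores_per_node frames_per_dir
instance (frame_list : List Int) (cores_per_node : Int) (frames_per_dir : Int) (out : List (Int × List Int)) : Decidable (Spec_distribute_frames_py frame_list cores_per_node frames_per_dir out) := by unfold Spec_distribute_frames_py; infer_instance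
def pvDiffWitness_distribute_frames_py : List Int × Int × Int := ([1, 2], 1, -1)
def pvDiffWitnessOut_distribute_frames_py : (List (Int × List Int)) × (List (Int × List Int)) := ([(0, [1])], [(0, [])])

-- ===== CLAIM (what is proved, stated in full; the proofs are below) =====
def Claim_unchanged_distribute_frames_py : Prop := ∀ (frame_list : List Int) (cores_per_node : Int) (frames_per_dir : Int), Dom_distribute_frames_py frame_list cores_per_node frames_per_dir → Pre_distribute_frames_py frame_list cores_per_node frames_per_dir → Spec_distribute_frames_py frame_list cores_per_node frames_per_dir (distribute_frames_py frame_list cores_per_node frames_per_dir)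
def Claim_changed_distribute_frames_py : Prop := Dom_distribute_frames_py (pvDiffWitness_distribute_frames_py.1) (pvDiffWitness_distribute_frames_py.2.1) (pvDiffWitness_distribute_frames_py.2.2) ∧ Pre_distribute_frames_py (pvDiffWitness_distribute_frames_py.1) (pvDiffWitness_distribute_frames_py.2.1) (pvDiffWitness_distribute_frames_py.2.2) ∧ D_distribute_frames_py (pvDiffWitness_distribute_frames_py.1) (pvDiffWitness_distribute_frames_py.2.1) (pvDiffWitness_distribute_frames_py.2.2) ∧ distribute_frames_py (pvDiffWitness_distribute_frames_py.1) (pvDiffWitness_distribute_frames_py.2.1) (pvDiffWitness_distribute_frames_py.2.2) = pvDiffWitnessOut_distribute_frames_py.1 ∧ distribute_frames_py_alt (pvDiffWitness_distribute_frames_py.1) (pvDiffWitness_distribute_frames_py.2.1) (pvDiffWitness_distribute_frames_py.2.2) = pvDiffWitnessOut_distribute_frames_py.2 ∧ pvDiffWitnessOut_distribute_frames_py.1 ≠ pvDiffWitnessOut_distribute_frames_py.2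
def Claim_exact_distribute_frames_py : Prop := ∀ (frame_list : List Int) (cores_per_node : Int) (frames_per_dir : Int), Dom_distribute_frames_py frame_list cores_per_node frames_per_dir → Pre_distribute_frames_py frame_list cores_per_node frames_per_dir → D_distribute_frames_py frame_list cores_per_node frames_per_dir → distribute_frames_py frame_list cores_per_node frames_per_dir ≠ distribute_frames_py_alt frame_list cores_per_node frames_per_dir

-- ===== LEMMAS AND PROOFS =====

-- a negative stop behaves like stop 0: both ranges are empty
lemma pv_range_toNat (k : Int) :
    PySem.List.pyRange 0 k = PySem.List.pyRange 0 ((k.toNat : Nat) : Int) := by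
  rcases (show (0:Int) ≤ k ∨ k < 0 by omega) with h | h
  · rw [Int.toNat_of_nonneg h]
  · have h1 : k.toNat = 0 := by omega
    rw [h1]
    simp [PySem.List.pyRange, show ¬(0:Int) < k by omega]

-- A's loop invariant: after m iterations the dict holds the slice for each of 0..m-1
-- at the closed-form cursor positions, and the cursor sits at the offset for index m
lemma pv_loop (fl : List Int) (r fpd : Int) (m : Nat) :
    (PySem.List.pyRange 0 (m : Int)).foldl
      (fun (st : PySem.Dict Int (List Int) × Int) dir_num =>
        (st.1.insert dir_num (PySem.List.slice fl (some st.2)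
            (some (if dir_num < r then st.2 + fpd + 1 else st.2 + fpd))),
         if dir_num < r then st.2 + fpd + 1 else st.2 + fpd))
      (PySem.Dict.empty, 0)
    = (PySem.Dict.mk ((PySem.List.pyRange 0 (m : Int)).map (fun i =>
        (i, PySem.List.slice fl (some (i * fpd + max 0 (min i r)))
            (some (i * fpd + max 0 (min i r) + fpd + (if i < r then 1 else 0)))))),
       (m : Int) * fpd + max 0 (min (m : Int) r)) := by
  induction m with
  | zero => simp [PySem.List.pyRange, PySem.Dict.empty]
  | succ m ih =>
    have hcast : ((m + 1 : Nat) : Int) = (m : Int) + 1 := by push_cast; ring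
    rw [hcast, PySem.List.pyRange_one_succ_right (by positivity), List.foldl_append,
      List.map_append, ih]
    simp only [List.foldl_cons, List.foldl_nil, List.map_cons, List.map_nil]
    have hfresh : (PySem.Dict.mk ((PySem.List.pyRange 0 (m : Int)).map (fun i =>
        (i, PySem.List.slice fl (some (i * fpd + max 0 (min i r)))
            (some (i * fpd + max 0 (min i r) + fpd + (if i < r then 1 else 0))))))).contains
          (m : Int) = false := by
      rw [PySem.Dict.contains_eq_decide_mem_keys]
      simp only [PySem.Dict.keys_mk, List.map_map, decide_eq_false_iff_not, List.mem_map,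
        Function.comp_apply]
      rintro ⟨j, hj, hje⟩
      have := PySem.List.mem_pyRange_one.mp hj
      omega
    refine Prod.ext ?_ ?_
    · apply PySem.Dict.ext
      rw [PySem.Dict.items_insert_of_not_contains _ _ hfresh]
      have hend : (if (m : Int) < r then (m : Int) * fpd + max 0 (min (m : Int) r) + fpd + 1
            else (m : Int) * fpd + max 0 (min (m : Int) r) + fpd)
          = (m : Int) * fpd + max 0 (min (m : Int) r) + fpd + (if (m : Int) < r then 1 else 0) := by
        split_ifs <;> omega
      simp [hend]
    · simp only
      have hmax : max 0 (min ((m : Int) + 1) r) = max 0 (min (m : Int) r) +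
          (if (m : Int) < r then 1 else 0) := by split_ifs <;> omega
      rw [hmax]
      split_ifs <;> ring

-- modifying a present key of a literal range-keyed dict rewrites just that entry
lemma pv_mk_modify (n j : Int) (g : Int → List Int) (fn : List Int → List Int)
    (hj0 : 0 ≤ j) (hjn : j < n) :
    (PySem.Dict.mk ((PySem.List.pyRange 0 n).map (fun i => (i, g i)))).modify j [] fn
    = PySem.Dict.mk ((PySem.List.pyRange 0 n).map
        (fun i => (i, if i = j then fn (g i) else g i))) := by
  have hmem : (j, g j) ∈ (PySem.List.pyRange 0 n).map (fun i => (i, g i)) :=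
    List.mem_map.mpr ⟨j, PySem.List.mem_pyRange_one.mpr ⟨hj0, hjn⟩, rfl⟩
  have hnodup : (PySem.Dict.mk ((PySem.List.pyRange 0 n).map (fun i => (i, g i)))).keys.Nodup := by
    simp only [PySem.Dict.keys_mk, List.map_map]
    have h1 : ((fun p => p.1) ∘ (fun i : Int => (i, g i))) = id := rfl
    rw [h1, List.map_id]
    exact PySem.List.nodup_pyRange_one 0 n
  have hget : (PySem.Dict.mk ((PySem.List.pyRange 0 n).map (fun i => (i, g i)))).getD j [] = g j :=
    PySem.Dict.getD_of_mem_items _ hmem hnodup []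
  have hcont : (PySem.Dict.mk ((PySem.List.pyRange 0 n).map (fun i => (i, g i)))).contains j = true := by
    rw [PySem.Dict.contains_eq_decide_mem_keys]
    simp only [PySem.Dict.keys_mk, List.map_map, decide_eq_true_eq]
    exact List.mem_map.mpr ⟨j, PySem.List.mem_pyRange_one.mpr ⟨hj0, hjn⟩, rfl⟩
  show (PySem.Dict.mk _).insert j (fn ((PySem.Dict.mk ((PySem.List.pyRange 0 n).map (fun i => (i, g i)))).getD j [])) = _
  apply PySem.Dict.ext
  rw [hget, PySem.Dict.items_insert_of_contains _ _ hcont]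
  show ((PySem.List.pyRange 0 n).map (fun i => (i, g i))).map _ = _
  rw [List.map_map]
  apply List.map_congr_left
  intro i hiR
  by_cases h : i = j <;> simp [Function.comp, h]

-- a directory index produced with guard i < n is nonnegative (0 ≤ r, or n below every index)
lemma pv_hnn (n f r j i : Int) (hj : 0 ≤ j) (hcase : 0 ≤ r ∨ n < r)
    (h : (if j < (f + 1) * r then some (PySem.Int.floordiv j (f + 1))
          else if f > 0 then some (r + PySem.Int.floordiv (j - (f + 1) * r) f)
          else none) = some i)
    (hin : i < n) : 0 ≤ i := by
  have key : 0 ≤ i ∨ r ≤ i := by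
    by_cases hlt : j < (f + 1) * r
    · rw [if_pos hlt, Option.some_inj] at h
      rcases (show f + 1 > 0 ∨ f + 1 = 0 ∨ f + 1 < 0 by omega) with h1 | h1 | h1
      · left
        rw [← h]
        exact (PySem.Int.le_floordiv_iff_mul_le h1 (q := 0)).mpr (by rw [zero_mul]; exact hj)
      · exfalso
        rw [show f + 1 = 0 from h1, zero_mul] at hlt
        omega
      · right
        obtain ⟨hm1, hm2⟩ := PySem.Int.mod_neg_bounds j h1
        have hdm := PySem.Int.floordiv_mul_add_mod j (f + 1)
        by_contra hcon
        have hc1 : i ≤ r - 1 := by omega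
        nlinarith [hdm, hm1, hm2, h, hc1]
    · rw [if_neg hlt] at h
      by_cases hfp : f > 0
      · rw [if_pos hfp, Option.some_inj] at h
        right
        have : 0 ≤ PySem.Int.floordiv (j - (f + 1) * r) f :=
          (PySem.Int.le_floordiv_iff_mul_le hfp (q := 0)).mpr (by rw [zero_mul]; omega)
        omega
      · rw [if_neg hfp] at h; cases h
  rcases key with h1 | h1
  · exact h1
  · rcases hcase with h2 | h2 <;> omega

-- B's loop invariant: scattering the enumerated frames into range-keyed buckets appends
-- to bucket i exactly the frames whose index the inverse layout map sends to i
lemma pv_scatter (n f r : Int) (l : List (Int × Int)) (g : Int → List Int)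
    (hcase : 0 ≤ r ∨ n < r) (hj : ∀ p ∈ l, 0 ≤ p.1) :
    l.foldl
      (fun (b : PySem.Dict Int (List Int)) p =>
        if p.1 < (f + 1) * r then
          if PySem.Int.floordiv p.1 (f + 1) < n then
            b.modify (PySem.Int.floordiv p.1 (f + 1)) [] (· ++ [p.2]) else b
        else if f > 0 then
          if r + PySem.Int.floordiv (p.1 - (f + 1) * r) f < n then
            b.modify (r + PySem.Int.floordiv (p.1 - (f + 1) * r) f) [] (· ++ [p.2]) else b
        else b)
      (PySem.Dict.mk ((PySem.List.pyRange 0 n).map (fun i => (i, g i))))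
    = PySem.Dict.mk ((PySem.List.pyRange 0 n).map
        (fun i => (i, g i ++ (l.filter (fun p =>
            (if p.1 < (f + 1) * r then some (PySem.Int.floordiv p.1 (f + 1))
             else if f > 0 then some (r + PySem.Int.floordiv (p.1 - (f + 1) * r) f)
             else none) == some i)).map (·.2)))) := by
  induction l generalizing g with
  | nil => simp
  | cons p l ih =>
    have hj0 : 0 ≤ p.1 := hj p List.mem_cons_self
    have hjl : ∀ q ∈ l, 0 ≤ q.1 := fun q hq => hj q (List.mem_cons_of_mem p hq)
    rw [List.foldl_cons]
    have step : ∀ (i₀ : Int),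
        (if p.1 < (f + 1) * r then some (PySem.Int.floordiv p.1 (f + 1))
         else if f > 0 then some (r + PySem.Int.floordiv (p.1 - (f + 1) * r) f)
         else none) = some i₀ →
        (if p.1 < (f + 1) * r then
          if PySem.Int.floordiv p.1 (f + 1) < n then
            (PySem.Dict.mk ((PySem.List.pyRange 0 n).map (fun i => (i, g i)))).modify
              (PySem.Int.floordiv p.1 (f + 1)) [] (· ++ [p.2])
          else PySem.Dict.mk ((PySem.List.pyRange 0 n).map (fun i => (i, g i)))
        else if f > 0 then
          if r + PySem.Int.floordiv (p.1 - (f + 1) * r) f < n then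
            (PySem.Dict.mk ((PySem.List.pyRange 0 n).map (fun i => (i, g i)))).modify
              (r + PySem.Int.floordiv (p.1 - (f + 1) * r) f) [] (· ++ [p.2])
          else PySem.Dict.mk ((PySem.List.pyRange 0 n).map (fun i => (i, g i)))
        else PySem.Dict.mk ((PySem.List.pyRange 0 n).map (fun i => (i, g i))))
        = (if i₀ < n then
            (PySem.Dict.mk ((PySem.List.pyRange 0 n).map (fun i => (i, g i)))).modify i₀ [] (· ++ [p.2])
          else PySem.Dict.mk ((PySem.List.pyRange 0 n).map (fun i => (i, g i)))) := by
      intro i₀ hidx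
      by_cases hlt : p.1 < (f + 1) * r
      · rw [if_pos hlt] at hidx ⊢
        rw [Option.some_inj] at hidx
        rw [hidx]
      · rw [if_neg hlt] at hidx ⊢
        by_cases hfp : f > 0
        · rw [if_pos hfp] at hidx ⊢
          rw [Option.some_inj] at hidx
          rw [hidx]
        · rw [if_neg hfp] at hidx; cases hidx
    rcases hidx : (if p.1 < (f + 1) * r then some (PySem.Int.floordiv p.1 (f + 1))
         else if f > 0 then some (r + PySem.Int.floordiv (p.1 - (f + 1) * r) f)
         else none) with _ | i₀
    · -- no branch assigns a directory: the dict is unchanged and the filter drops p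
      have hnone : (if p.1 < (f + 1) * r then
          if PySem.Int.floordiv p.1 (f + 1) < n then
            (PySem.Dict.mk ((PySem.List.pyRange 0 n).map (fun i => (i, g i)))).modify
              (PySem.Int.floordiv p.1 (f + 1)) [] (· ++ [p.2])
          else PySem.Dict.mk ((PySem.List.pyRange 0 n).map (fun i => (i, g i)))
        else if f > 0 then
          if r + PySem.Int.floordiv (p.1 - (f + 1) * r) f < n then
            (PySem.Dict.mk ((PySem.List.pyRange 0 n).map (fun i => (i, g i)))).modify
              (r + PySem.Int.floordiv (p.1 - (f + 1) * r) f) [] (· ++ [p.2])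
          else PySem.Dict.mk ((PySem.List.pyRange 0 n).map (fun i => (i, g i)))
        else PySem.Dict.mk ((PySem.List.pyRange 0 n).map (fun i => (i, g i))))
          = PySem.Dict.mk ((PySem.List.pyRange 0 n).map (fun i => (i, g i))) := by
        by_cases hlt : p.1 < (f + 1) * r
        · rw [if_pos hlt] at hidx; cases hidx
        · rw [if_neg hlt] at hidx ⊢
          by_cases hfp : f > 0
          · rw [if_pos hfp] at hidx; cases hidx
          · rw [if_neg hfp]
      rw [hnone, ih g hjl]
      refine congrArg PySem.Dict.mk (List.map_congr_left ?_)
      intro i hiR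
      simp [hidx]
    · rw [step i₀ hidx]
      by_cases hlt : i₀ < n
      · have h0 : 0 ≤ i₀ := pv_hnn n f r p.1 i₀ hj0 hcase hidx hlt
        rw [if_pos hlt, pv_mk_modify n i₀ g _ h0 hlt, ih _ hjl]
        refine congrArg PySem.Dict.mk (List.map_congr_left ?_)
        intro i hiR
        by_cases h : i = i₀
        · subst h
          simp [hidx]
        · simp [hidx, h, Ne.symm h]
      · rw [if_neg hlt, ih g hjl]
        refine congrArg PySem.Dict.mk (List.map_congr_left ?_)
        intro i hiR
        have hi := PySem.List.mem_pyRange_one.mp hiR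
        have hne : i ≠ i₀ := by omega
        simp [hidx, Ne.symm hne]
lemma pv_enum_interval (xs : List Int) (s a b : Int) :
    ((PySem.List.enumerate xs s).filter
        (fun p => decide (a ≤ p.1) && decide (p.1 < b))).map (·.2)
    = (xs.drop (a - s).toNat).take (b - max a s).toNat := by
  induction xs generalizing s with
  | nil => simp
  | cons x xs ih =>
    rw [PySem.List.enumerate_cons, List.filter_cons]
    by_cases h1 : a ≤ s ∧ s < b
    · have e1 : (a - s).toNat = 0 := by omega
      have e2 : (b - max a s).toNat = (b - max a (s + 1)).toNat + 1 := by omega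
      simp only [h1.1, h1.2, decide_true, Bool.and_self, List.map_cons, ite_true]
      rw [ih (s + 1), e1, e2, List.drop_zero, List.take_succ_cons]
      have e3 : (a - (s + 1)).toNat = 0 := by omega
      rw [e3, List.drop_zero]
    · have hc : (decide (a ≤ s) && decide (s < b)) = false := by
        rcases not_and_or.mp h1 with h | h <;> simp [h]
      rw [if_neg (by simp [hc])]
      rw [ih (s + 1)]
      rcases not_and_or.mp h1 with h | h
      · -- s < a
        have e1 : (a - s).toNat = (a - (s + 1)).toNat + 1 := by omega
        have e2 : max a s = a := by omega
        have e3 : max a (s + 1) = a := by omega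
        rw [e1, e2, e3, List.drop_succ_cons]
      · -- b ≤ s
        have e1 : (b - max a s).toNat = 0 := by omega
        have e2 : (b - max a (s + 1)).toNat = 0 := by omega
        rw [e1, e2, List.take_zero, List.take_zero]

lemma pv_idx_iff (f r i j : Int) (hf : 0 ≤ f) (hr : 0 ≤ r) (hi : 0 ≤ i) :
    ((if j < (f + 1) * r then some (PySem.Int.floordiv j (f + 1))
      else if f > 0 then some (r + PySem.Int.floordiv (j - (f + 1) * r) f)
      else none) = some i)
    ↔ (i * f + max 0 (min i r) ≤ j ∧
       j < i * f + max 0 (min i r) + f + (if i < r then 1 else 0)) := by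
  have hm : max 0 (min i r) = min i r := by omega
  rw [hm]
  have hf1 : (0 : Int) < f + 1 := by omega
  by_cases hlt : j < (f + 1) * r
  · rw [if_pos hlt]
    rw [Option.some_inj, PySem.Int.floordiv_eq_iff_of_pos hf1]
    by_cases hir : i < r
    · have hmin : min i r = i := by omega
      rw [hmin, if_pos hir]
      constructor
      · rintro ⟨h1, h2⟩; constructor <;> nlinarith
      · rintro ⟨h1, h2⟩; constructor <;> nlinarith
    · have hmin : min i r = r := by omega
      rw [hmin, if_neg hir]
      constructor
      · rintro ⟨h1, h2⟩
        -- i*(f+1) ≤ j < r*(f+1) forces i < r, contradiction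
        exfalso
        have : i * (f + 1) < r * (f + 1) := by nlinarith
        have : i < r := lt_of_mul_lt_mul_right this (by omega)
        omega
      · rintro ⟨h1, h2⟩
        -- i*f + r ≤ j < i*f + r + f together with j < (f+1)*r forces i < r
        exfalso
        nlinarith
  · rw [if_neg hlt]
    by_cases hfp : f > 0
    · rw [if_pos hfp, Option.some_inj]
      have heq : (r + PySem.Int.floordiv (j - (f + 1) * r) f = i)
          ↔ (PySem.Int.floordiv (j - (f + 1) * r) f = i - r) := by omega
      rw [heq, PySem.Int.floordiv_eq_iff_of_pos hfp]
      by_cases hir : i < r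
      · have hmin : min i r = i := by omega
        rw [hmin, if_pos hir]
        constructor
        · rintro ⟨h1, h2⟩
          exfalso
          -- (i-r)*f ≤ j - (f+1)*r with i-r < 0 but j - (f+1)*r ≥ 0
          nlinarith
        · rintro ⟨h1, h2⟩
          exfalso
          -- (f+1)*r ≤ j < i*(f+1) + f + 1 = (i+1)*(f+1) forces r ≤ i
          have h3 : r * (f + 1) < (i + 1) * (f + 1) := by nlinarith
          have : r < i + 1 := lt_of_mul_lt_mul_right h3 (by omega)
          omega
      · have hmin : min i r = r := by omega
        rw [hmin, if_neg hir]
        constructor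
        · rintro ⟨h1, h2⟩; constructor <;> nlinarith
        · rintro ⟨h1, h2⟩; constructor <;> nlinarith
    · rw [if_neg hfp]
      have hf0 : f = 0 := by omega
      subst hf0
      have hr' : r ≤ j := by
        have : (0 + 1) * r = r := by ring
        omega
      constructor
      · intro h; cases h
      · rintro ⟨h1, h2⟩
        exfalso
        simp only [mul_zero, zero_add, add_zero] at h1 h2
        by_cases hir : i < r
        · rw [if_pos hir] at h2; omega
        · rw [if_neg hir] at h2; omega

lemma pv_bucket_eq (fl : List Int) (f r i : Int) (hf : 0 ≤ f) (hr : 0 ≤ r) (hi : 0 ≤ i) :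
    PySem.List.slice fl (some (i * f + max 0 (min i r)))
        (some (i * f + max 0 (min i r) + f + (if i < r then 1 else 0)))
    = ((PySem.List.enumerate fl 0).filter
        (fun p => (if p.1 < (f + 1) * r then some (PySem.Int.floordiv p.1 (f + 1))
                   else if f > 0 then some (r + PySem.Int.floordiv (p.1 - (f + 1) * r) f)
                   else none) == some i)).map (·.2) := by
  set a := i * f + max 0 (min i r) with ha
  set b := i * f + max 0 (min i r) + f + (if i < r then 1 else 0) with hb
  have ha0 : 0 ≤ a := by
    have : 0 ≤ i * f := mul_nonneg hi hf
    simp only [ha]; omega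
  have hab : a ≤ b := by simp only [ha, hb]; split_ifs <;> omega
  have hpred : (fun (p : Int × Int) =>
      ((if p.1 < (f + 1) * r then some (PySem.Int.floordiv p.1 (f + 1))
        else if f > 0 then some (r + PySem.Int.floordiv (p.1 - (f + 1) * r) f)
        else none) == some i))
      = (fun p => decide (a ≤ p.1) && decide (p.1 < b)) := by
    funext p
    rw [Bool.eq_iff_iff]
    simp only [beq_iff_eq, Bool.and_eq_true, decide_eq_true_eq]
    exact pv_idx_iff f r i p.1 hf hr hi
  rw [hpred, pv_enum_interval fl 0 a b]
  have e1 : (a - 0).toNat = a.toNat := by omega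
  have e2 : max a 0 = a := by omega
  rw [e1, e2, PySem.List.slice_toNat fl ha0 (le_trans ha0 hab)]
  congr 1
  omega


lemma pv_slice_empty (fl : List Int) (k f i : Int) (hk : 0 < k) (hf : f < 0)
    (hi : 0 ≤ i) (hin : i < min k (fl.length : Int))
    (hnd : ¬ D_distribute_frames_py fl k f) :
    PySem.List.slice fl
        (some (i * f + max 0 (min i (PySem.Int.mod (fl.length : Int) k))))
        (some (i * f + max 0 (min i (PySem.Int.mod (fl.length : Int) k)) + f +
          (if i < PySem.Int.mod (fl.length : Int) k then 1 else 0))) = ([] : List Int) := by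
  have hrdef : PySem.Int.mod (fl.length : Int) k = (fl.length : Int) % k :=
    PySem.Int.mod_eq_emod_of_pos hk
  have hnd' : ¬ (if f = -1 then
        2 ≤ fl.length ∧ k.toNat ≤ fl.length
      else
        f.natAbs < fl.length + (if (fl.length : Int) % k = 0 then 0 else 1)) :=
    fun hh => hnd ⟨hk, hf, hh⟩
  have hL0 : (0 : Int) ≤ (fl.length : Int) := by positivity
  have hr1 : 0 ≤ (fl.length : Int) % k := Int.emod_nonneg _ (ne_of_gt hk)
  have hr2 : (fl.length : Int) % k < k := Int.emod_lt_of_pos _ hk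
  have hr5 : (fl.length : Int) % k = (fl.length : Int) ∨ k ≤ (fl.length : Int) := by
    rcases (show k ≤ (fl.length : Int) ∨ (fl.length : Int) < k by omega) with h | h
    · right; exact h
    · left; exact Int.emod_eq_of_lt hL0 h
  apply List.eq_nil_of_length_eq_zero
  rw [PySem.List.length_slice]
  rw [hrdef]
  rcases (show f = -1 ∨ f ≤ -2 by omega) with hf1 | hf2
  · subst hf1
    rw [if_pos rfl] at hnd'
    simp only [mul_neg_one, PySem.List.clampIdx]
    split_ifs <;> omega
  · rw [if_neg (by omega)] at hnd'
    have hP : i * f ≤ -2 * i := by nlinarith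
    have hP0 : i = 0 → i * f = 0 := fun h => by rw [h, zero_mul]
    rcases (show i = 0 ∨ 1 ≤ i by omega) with hi0 | hi1
    · rw [hP0 hi0]
      by_cases hm : (fl.length : Int) % k = 0
      · rw [if_pos hm] at hnd'
        simp only [PySem.List.clampIdx]
        split_ifs <;> omega
      · rw [if_neg hm] at hnd'
        simp only [PySem.List.clampIdx]
        split_ifs <;> omega
    · by_cases hm : (fl.length : Int) % k = 0
      · rw [if_pos hm] at hnd'
        simp only [PySem.List.clampIdx]
        split_ifs <;> omega
      · rw [if_neg hm] at hnd'
        simp only [PySem.List.clampIdx]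
        split_ifs <;> omega

-- with fpd < 0 the inverse layout map is undefined for every frame
lemma pv_idx_none (f r j : Int) (hf : f < 0) (hr : 0 ≤ r) (hj : 0 ≤ j) :
    (if j < (f + 1) * r then some (PySem.Int.floordiv j (f + 1))
     else if f > 0 then some (r + PySem.Int.floordiv (j - (f + 1) * r) f)
     else none) = (none : Option Int) := by
  have hb : (f + 1) * r ≤ 0 := mul_nonpos_of_nonpos_of_nonneg (by omega) hr
  simp [show ¬ j < (f + 1) * r by omega, show ¬ f > 0 by omega]

-- with fpd < 0 no frame passes the inverse layout map, so every bucket filter is empty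
lemma pv_filter_none (fl : List Int) (f r i : Int) (hf : f < 0) (hr : 0 ≤ r) :
    ((PySem.List.enumerate fl 0).filter (fun p =>
      (if p.1 < (f + 1) * r then some (PySem.Int.floordiv p.1 (f + 1))
       else if f > 0 then some (r + PySem.Int.floordiv (p.1 - (f + 1) * r) f)
       else none) == some i)) = [] := by
  refine List.filter_eq_nil_iff.mpr ?_
  intro p hp
  obtain ⟨k', hk', hpe⟩ := (PySem.List.mem_enumerate_iff fl 0 p).mp hp
  have hp0 : 0 ≤ p.1 := by rw [hpe]; positivity
  rw [pv_idx_none f r p.1 hf hr hp0]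
  simp

-- ===== VERDICT (by name: the statement is the Claim_ definition above) =====
theorem distribute_frames_py_spec : Claim_unchanged_distribute_frames_py := by
  intro fl k f _ hkne hnd
  unfold distribute_frames_py distribute_frames_py_alt
  simp only
  have hkne' : k ≠ 0 := hkne
  have hL0 : (0 : Int) ≤ (fl.length : Int) := by positivity
  have hjall : ∀ p ∈ PySem.List.enumerate fl 0, 0 ≤ p.1 := by
    intro p hp
    obtain ⟨k', hk', hpe⟩ := (PySem.List.mem_enumerate_iff fl 0 p).mp hp
    rw [hpe]; positivity
  rcases (show 0 < k ∨ k < 0 by omega) with hk | hk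
  · -- 0 < cores_per_node
    have hr0 : 0 ≤ PySem.Int.mod (fl.length : Int) k := PySem.Int.mod_nonneg _ hk
    rw [pv_scatter (min k (fl.length : Int)) f (PySem.Int.mod (fl.length : Int) k)
      (PySem.List.enumerate fl 0) (fun _ => []) (Or.inl hr0) hjall]
    rw [pv_range_toNat (min k (fl.length : Int)), pv_loop]
    simp only
    refine List.map_congr_left ?_
    intro i hiR
    obtain ⟨hi0, hiU⟩ := PySem.List.mem_pyRange_one.mp hiR
    have hin : i < min k (fl.length : Int) := by omega
    rcases (show 0 ≤ f ∨ f < 0 by omega) with hf | hf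
    · simp only [List.nil_append]
      exact congrArg (Prod.mk i) (pv_bucket_eq fl f (PySem.Int.mod (fl.length : Int) k) i hf hr0 hi0)
    · have hA := pv_slice_empty fl k f i hk hf hi0 hin hnd
      have hB : ((PySem.List.enumerate fl 0).filter (fun p =>
          (if p.1 < (f + 1) * PySem.Int.mod (fl.length : Int) k then
             some (PySem.Int.floordiv p.1 (f + 1))
           else if f > 0 then
             some (PySem.Int.mod (fl.length : Int) k +
               PySem.Int.floordiv (p.1 - (f + 1) * PySem.Int.mod (fl.length : Int) k) f)
           else none) == some i)) = [] := by
        refine List.filter_eq_nil_iff.mpr ?_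
        intro p hp
        rw [pv_idx_none f (PySem.Int.mod (fl.length : Int) k) p.1 hf hr0 (hjall p hp)]
        simp
      rw [hB]
      simp [hA]
  · -- cores_per_node < 0: no directories at all on either side
    have hrk : k < PySem.Int.mod (fl.length : Int) k := (PySem.Int.mod_neg_bounds _ hk).1
    have hmin : min k (fl.length : Int) = k := by omega
    rw [pv_scatter (min k (fl.length : Int)) f (PySem.Int.mod (fl.length : Int) k)
      (PySem.List.enumerate fl 0) (fun _ => []) (Or.inr (by omega)) hjall]
    rw [hmin, PySem.List.pyRange_one_eq_nil (le_of_lt hk)]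
    simp [PySem.Dict.empty]

theorem distribute_frames_py_changed : Claim_changed_distribute_frames_py := by
  unfold Claim_changed_distribute_frames_py; decide

theorem distribute_frames_py_tight : Claim_exact_distribute_frames_py := by
  intro fl k f _ _ hD heq
  obtain ⟨hk, hfneg, hcond⟩ := hD
  unfold distribute_frames_py distribute_frames_py_alt at heq
  simp only at heq
  have hL0 : (0 : Int) ≤ (fl.length : Int) := by positivity
  have hrdef : PySem.Int.mod (fl.length : Int) k = (fl.length : Int) % k :=
    PySem.Int.mod_eq_emod_of_pos hk
  have hr1 : 0 ≤ (fl.length : Int) % k := Int.emod_nonneg _ (ne_of_gt hk)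
  have hr2 : (fl.length : Int) % k < k := Int.emod_lt_of_pos _ hk
  have hjall : ∀ p ∈ PySem.List.enumerate fl 0, 0 ≤ p.1 := by
    intro p hp
    obtain ⟨k', hk', hpe⟩ := (PySem.List.mem_enumerate_iff fl 0 p).mp hp
    rw [hpe]; positivity
  have hr0 : 0 ≤ PySem.Int.mod (fl.length : Int) k := PySem.Int.mod_nonneg _ hk
  rw [pv_scatter (min k (fl.length : Int)) f (PySem.Int.mod (fl.length : Int) k)
    (PySem.List.enumerate fl 0) (fun _ => []) (Or.inl hr0) hjall] at heq
  rw [pv_range_toNat (min k (fl.length : Int)), pv_loop] at heq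
  simp only at heq
  simp only [pv_filter_none fl f (PySem.Int.mod (fl.length : Int) k) _ hfneg hr0,
    List.map_nil, List.append_nil] at heq
  have hpt := List.map_inj_left.mp heq
  rcases (show f = -1 ∨ f ≤ -2 by omega) with hf1 | hf2
  · -- the directory r receives the wrapped tail frame_list[0:-1]
    subst hf1
    rw [if_pos rfl] at hcond
    obtain ⟨hlen2, hkL⟩ := hcond
    have hkL' : k ≤ (fl.length : Int) := by omega
    have hmem : (fl.length : Int) % k ∈
        PySem.List.pyRange 0 (((min k (fl.length : Int)).toNat : Nat) : Int) :=
      PySem.List.mem_pyRange_one.mpr ⟨hr1, by omega⟩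
    have := hpt _ hmem
    rw [Prod.mk.injEq, hrdef] at this
    have hslice := this.2
    have hlen := congrArg List.length hslice
    rw [PySem.List.length_slice] at hlen
    simp only [mul_neg_one, List.length_nil, PySem.List.clampIdx] at hlen
    split_ifs at hlen <;> omega
  · -- directory 0 receives the wrapped slice frame_list[0:fpd(+1)]
    rw [if_neg (by omega)] at hcond
    have hnK : (1 : Int) ≤ min k (fl.length : Int) := by
      rcases (show (fl.length : Int) % k = 0 ∨ (fl.length : Int) % k ≠ 0 by omega)
        with hm | hm
      · rw [if_pos hm] at hcond; omega
      · rw [if_neg hm] at hcond; omega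
    have hmem : (0 : Int) ∈
        PySem.List.pyRange 0 (((min k (fl.length : Int)).toNat : Nat) : Int) :=
      PySem.List.mem_pyRange_one.mpr ⟨le_refl 0, by omega⟩
    have := hpt _ hmem
    rw [Prod.mk.injEq, hrdef] at this
    have hslice := this.2
    have hlen := congrArg List.length hslice
    rw [PySem.List.length_slice] at hlen
    simp only [zero_mul, zero_add, List.length_nil, PySem.List.clampIdx] at hlen
    rcases (show (fl.length : Int) % k = 0 ∨ (fl.length : Int) % k ≠ 0 by omega)
      with hm | hm
    · rw [if_pos hm] at hcond
      split_ifs at hlen <;> omega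
    · rw [if_neg hm] at hcond
      split_ifs at hlen <;> omega
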